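-- pv_equiv track=rewrite | github.com/open-power-ref-design/cluster-genesis | scripts/python/software_hosts.py | _get_hosts_list
-- ===== SOURCE A (Python) =====
-- def _get_hosts_list(dynamic_inventory, top_level_group='all'):
--     """Get a list of hosts.
--
--     Args:
--         dynamic_inventory (dict): Dynamic inventory dictionary
--         top_level_group (str): Name of top level group
--
--     Returns:
--         list: List containing all inventory hosts
--     """
--     hosts_list = []
--     if 'hosts' in dynamic_inventory[top_level_group]:
--         hosts_list += dynamic_inventory[top_level_group]['hosts']
--     if 'children' in dynamic_inventory[top_level_group]:
--         for child in dynamic_inventory[top_level_group]['children']: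
--             hosts_list += _get_hosts_list(dynamic_inventory, child)
--     return hosts_list
-- ===== SOURCE B (Python) =====
-- def _get_hosts_list(dynamic_inventory, top_level_group='all'):
--     """Get a list of hosts (iterative pre-order DFS with an explicit stack)."""
--     hosts_list = []
--     stack = [top_level_group]
--     while stack:
--         group = stack.pop()
--         entry = dynamic_inventory[group]
--         if 'hosts' in entry:
--             hosts_list += entry['hosts']
--         if 'children' in entry:
--             stack.extend(reversed(entry['children']))
--     return hosts_list
-- ===== Notes on version B (the rewrite author's own statement) =====
-- stated objective: alternative
-- what changed: Replaces the recursive tree walk by an iterative explicit-stack pre-order DFS (children pushed in reversed order), eliminating Python recursion (no RecursionError on deep trees) while emitting hosts in the identical order.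
import Mathlib
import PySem

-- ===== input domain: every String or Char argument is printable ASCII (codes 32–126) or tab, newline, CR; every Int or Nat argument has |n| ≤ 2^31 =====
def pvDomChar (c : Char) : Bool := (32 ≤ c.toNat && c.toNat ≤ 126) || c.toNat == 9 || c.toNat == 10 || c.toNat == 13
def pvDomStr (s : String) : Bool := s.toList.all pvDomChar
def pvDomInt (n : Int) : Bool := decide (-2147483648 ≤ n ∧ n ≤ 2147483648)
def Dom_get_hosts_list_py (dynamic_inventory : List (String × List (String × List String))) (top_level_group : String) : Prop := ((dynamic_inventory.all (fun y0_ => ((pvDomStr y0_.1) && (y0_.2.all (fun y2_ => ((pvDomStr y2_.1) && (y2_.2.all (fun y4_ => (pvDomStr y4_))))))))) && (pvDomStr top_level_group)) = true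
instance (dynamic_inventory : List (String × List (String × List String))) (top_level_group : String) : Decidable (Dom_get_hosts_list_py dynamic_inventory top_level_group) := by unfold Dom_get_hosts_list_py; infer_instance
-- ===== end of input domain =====

-- B replaces A's recursive tree walk by an iterative explicit-stack pre-order DFS with identical output order.
-- Both ports carry a fuel counter (one unit per visited node, threaded in DFS order) purely as a
-- totality guard; pvFuel is large enough that it never runs out on any input admitted by Pre_.

-- first-match association-list lookup (Python dict subscript/`in`; none = key absent, i.e. KeyError on subscript)
def pvGet? {α : Type} (l : List (String × α)) (k : String) : Option α :=
  (l.find? (fun p => p.1 == k)).map (·.2)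

-- dynamic_inventory[g] (Pre_ guarantees the key is present wherever this is reached; [] is never used inside Pre_)
def pvEntry (d : List (String × List (String × List String))) (g : String) : List (String × List String) :=
  (pvGet? d g).getD []

-- fuel: an upper bound on the number of nodes of the DFS expansion tree of any input satisfying Pre_
def pvFuel (d : List (String × List (String × List String))) : Nat :=
  (2 + d.foldl (fun a e => a + ((pvGet? e.2 "children").getD []).length) 0) ^ (d.length + 2)

-- ===== PORT A =====
-- A's recursion, fuel threaded through the walk in DFS order (the `min p.1 f` is a no-op — returned
-- fuel never exceeds the fuel passed in (pvVisitAList_fst_le below) — kept only for the termination measure).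
mutual
def pvVisitA (d : List (String × List (String × List String))) : Nat → String → Nat × List String
  | 0, _ => (0, [])
  | (f+1), g =>
    let entry := pvEntry d g
    -- hosts_list = [];  if 'hosts' in entry: hosts_list += entry['hosts']
    let hosts_list : List String :=
      match pvGet? entry "hosts" with
      | some hs => hs
      | none => []
    -- if 'children' in entry: for child in children: hosts_list += rec(child)
    match pvGet? entry "children" with
    | some cs => pvVisitAList d f cs hosts_list
    | none => (f, hosts_list)
termination_by f _ => (f, 0)
decreasing_by
  exact Prod.Lex.left _ _ (Nat.lt_succ_self _)

def pvVisitAList (d : List (String × List (String × List String))) : Nat → List String → List String → Nat × List String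
  | f, [], acc => (f, acc)
  | f, c :: cs, acc =>
    let p := pvVisitA d f c
    pvVisitAList d (min p.1 f) cs (acc ++ p.2)
termination_by f cs _ => (f, cs.length + 1)
decreasing_by
  · exact Prod.Lex.right _ (by simp)
  · rcases Nat.lt_or_eq_of_le (Nat.min_le_right _ f) with h | h
    · exact Prod.Lex.left _ _ h
    · rw [h]; exact Prod.Lex.right _ (by simp)
end

def get_hosts_list_py (dynamic_inventory : List (String × List (String × List String))) (top_level_group : String) : List String :=
  (pvVisitA dynamic_inventory (pvFuel dynamic_inventory) top_level_group).2

-- ===== PORT B =====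
-- B's while-loop.  The Python stack has its top at the END of the list; here the list is kept
-- top-at-HEAD, so `stack.pop()` is taking the head and `stack.extend(reversed(children))` is
-- prepending the children in order.  One fuel unit per pop, again only as a totality guard.
def pvLoopB (d : List (String × List (String × List String))) : Nat → List String → List String → List String
  | _, [], res => res
  | 0, _ :: _, res => res
  | (f+1), g :: rest, res =>
    let entry := pvEntry d g
    let res' : List String :=
      match pvGet? entry "hosts" with
      | some hs => res ++ hs
      | none => res
    let stack' : List String :=
      match pvGet? entry "children" with
      | some cs => cs ++ rest
      | none => rest
    pvLoopB d f stack' res'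

def get_hosts_list_py_alt (dynamic_inventory : List (String × List (String × List String))) (top_level_group : String) : List String :=
  pvLoopB dynamic_inventory (pvFuel dynamic_inventory) [top_level_group] []

-- ===== PRECONDITION & SPEC =====
-- children of g (empty when g is not a key or has no 'children' entry)
def pvChildrenOf (d : List (String × List (String × List String))) (g : String) : List String :=
  match pvGet? d g with
  | some e => (pvGet? e "children").getD []
  | none => []

-- one closure step of the children relation
def pvStepR (d : List (String × List (String × List String))) (s : List String) : List String :=
  (s ++ s.flatMap (pvChildrenOf d)).dedup

-- all groups reachable from s (pvFuel-independent bound: 2 + total number of child references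
-- is more than the number of distinct names that can ever appear, so the iteration reaches its fixpoint)
def pvReach (d : List (String × List (String × List String))) (s : List String) : List String :=
  (pvStepR d)^[2 + d.foldl (fun a e => a + ((pvGet? e.2 "children").getD []).length) 0] s

-- Pre_ = exactly the inputs on which the Python A returns normally: every group reachable from
-- top_level_group is a key of the inventory (otherwise KeyError) and no reachable group lies on a
-- children-cycle (otherwise the recursion never terminates).
def Pre_get_hosts_list_py (dynamic_inventory : List (String × List (String × List String))) (top_level_group : String) : Prop :=
  (∀ g ∈ pvReach dynamic_inventory [top_level_group], (pvGet? dynamic_inventory g).isSome = true) ∧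
  (∀ g ∈ pvReach dynamic_inventory [top_level_group], g ∉ pvReach dynamic_inventory (pvChildrenOf dynamic_inventory g))

instance (dynamic_inventory : List (String × List (String × List String))) (top_level_group : String) : Decidable (Pre_get_hosts_list_py dynamic_inventory top_level_group) := by
  unfold Pre_get_hosts_list_py; infer_instance

def pvWitness_get_hosts_list_py : (List (String × List (String × List String))) × String :=
  ([("all", [("hosts", ["h1"]), ("children", ["g1"])]), ("g1", [("hosts", ["h2"])])], "all")

def Spec_get_hosts_list_py (dynamic_inventory : List (String × List (String × List String))) (top_level_group : String) (out : List String) : Prop := out = get_hosts_list_py_alt dynamic_inventory top_level_group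
instance (dynamic_inventory : List (String × List (String × List String))) (top_level_group : String) (out : List String) : Decidable (Spec_get_hosts_list_py dynamic_inventory top_level_group out) := by unfold Spec_get_hosts_list_py; infer_instance

-- ===== CLAIM (what is proved, stated in full; the proofs are below) =====
def Claim_equal_get_hosts_list_py : Prop := ∀ (dynamic_inventory : List (String × List (String × List String))) (top_level_group : String), Dom_get_hosts_list_py dynamic_inventory top_level_group → Pre_get_hosts_list_py dynamic_inventory top_level_group → Spec_get_hosts_list_py dynamic_inventory top_level_group (get_hosts_list_py dynamic_inventory top_level_group)

-- ===== LEMMAS AND PROOFS =====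
theorem pvVisitAList_fst_le (d : List (String × List (String × List String))) (cs : List String) :
    ∀ f acc, (pvVisitAList d f cs acc).1 ≤ f := by
  induction cs with
  | nil => intro f acc; simp [pvVisitAList]
  | cons c cs ih =>
    intro f acc
    rw [pvVisitAList]
    exact le_trans (ih _ _) (Nat.min_le_right _ _)


theorem pvVisitA_fst_le (d : List (String × List (String × List String))) (f : Nat) (g : String) :
    (pvVisitA d f g).1 ≤ f := by
  cases f with
  | zero => simp [pvVisitA]
  | succ f =>
    rw [pvVisitA]
    cases pvGet? (pvEntry d g) "children" with
    | some cs => exact le_trans (pvVisitAList_fst_le d cs f _) (Nat.le_succ f)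
    | none => exact Nat.le_succ f

theorem pvVisitAList_zero (d : List (String × List (String × List String))) (cs : List String) :
    ∀ acc, pvVisitAList d 0 cs acc = (0, acc) := by
  induction cs with
  | nil => intro acc; simp [pvVisitAList]
  | cons c cs ih => intro acc; rw [pvVisitAList]; simp [pvVisitA, ih]

theorem pvVisitAList_acc (d : List (String × List (String × List String))) (cs : List String) :
    ∀ f acc, pvVisitAList d f cs acc
      = ((pvVisitAList d f cs []).1, acc ++ (pvVisitAList d f cs []).2) := by
  induction cs with
  | nil => intro f acc; simp [pvVisitAList]
  | cons c cs ih =>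
    intro f acc
    rw [pvVisitAList, pvVisitAList,
        ih (min (pvVisitA d f c).1 f) (acc ++ (pvVisitA d f c).2),
        ih (min (pvVisitA d f c).1 f) ([] ++ (pvVisitA d f c).2)]
    simp

theorem pvVisitAList_append (d : List (String × List (String × List String))) (l1 : List String) :
    ∀ l2 f acc, pvVisitAList d f (l1 ++ l2) acc
      = pvVisitAList d (pvVisitAList d f l1 acc).1 l2 (pvVisitAList d f l1 acc).2 := by
  induction l1 with
  | nil => intro l2 f acc; rw [List.nil_append, pvVisitAList]
  | cons c cs ih =>
    intro l2 f acc
    rw [List.cons_append, pvVisitAList, ih, pvVisitAList]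

theorem pvLoopB_eq (d : List (String × List (String × List String))) :
    ∀ f stack res, pvLoopB d f stack res = res ++ (pvVisitAList d f stack []).2 := by
  intro f
  induction f with
  | zero =>
    intro stack res
    cases stack with
    | nil => simp [pvLoopB, pvVisitAList]
    | cons g rest => simp [pvLoopB, pvVisitAList_zero]
  | succ f ih =>
    intro stack res
    cases stack with
    | nil => simp [pvLoopB, pvVisitAList]
    | cons g rest =>
      rw [pvLoopB, pvVisitAList]
      have hmin : min (pvVisitA d (f+1) g).1 (f+1) = (pvVisitA d (f+1) g).1 :=
        Nat.min_eq_left (pvVisitA_fst_le d (f+1) g)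
      rw [hmin, pvVisitAList_acc]
      rw [pvVisitA]
      cases hc : pvGet? (pvEntry d g) "children" with
      | some cs =>
        cases hh : pvGet? (pvEntry d g) "hosts" with
        | some hs =>
          simp only [ih, pvVisitAList_append]
          rw [pvVisitAList_acc d cs f hs, pvVisitAList_acc d rest]
          simp
        | none =>
          simp only [ih, pvVisitAList_append]
          rw [pvVisitAList_acc d cs f [], pvVisitAList_acc d rest]
          simp
      | none =>
        cases hh : pvGet? (pvEntry d g) "hosts" with
        | some hs => simp only [ih]; rw [pvVisitAList_acc d rest]; simp
        | none => simp only [ih]; rw [pvVisitAList_acc d rest]; simp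

-- ===== VERDICT (by name: the statement is the Claim_ definition above) =====
theorem get_hosts_list_py_spec : Claim_equal_get_hosts_list_py := by
  intro d top _hDom _hPre
  unfold Spec_get_hosts_list_py get_hosts_list_py get_hosts_list_py_alt
  rw [pvLoopB_eq, pvVisitAList, pvVisitAList]
  simp
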